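-- pv_equiv track=rewrite | github.com/priyamayur/NamedEntityRecognition | ExtractData.py | get_NER_position_positive_data
-- ===== SOURCE A (Python) =====
-- def get_NER_position_positive_data(dataset):
--   training_data = []
--   masked_count = []
--   for data in dataset:
--     complete_sentences = []
--     count = 0
--     count_frq = []
--     for ind, word in enumerate(data):
--       nonNer = 'O'
--       if word[1] != nonNer :
--         complete_sentences.append("<MASK>")
--         count += 1
--       else:
--         if (count != 0):
--           count_frq.append([count,ind-count])
--         count = 0
--         complete_sentences.append(word[0])
--     if (count != 0):
--         count_frq.append([count,ind-count+1])
--     training_data.append(complete_sentences)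
--     masked_count.append(count_frq)
--   return training_data,  masked_count
-- ===== SOURCE B (Python) =====
-- def _runs(tags):
--     # two-pointer scan over the mask list: find each maximal True run directly
--     runs = []
--     i = 0
--     n = len(tags)
--     while i < n:
--         if tags[i]:
--             j = i + 1
--             while j < n and tags[j]:
--                 j += 1
--             runs.append([j - i, i])
--             i = j
--         else:
--             i += 1
--     return runs
--
-- def get_NER_position_positive_data(dataset):
--     training_data = [["<MASK>" if tag != 'O' else w for w, tag in data] for data in dataset]
--     masked_count = [_runs([tag != 'O' for _, tag in data]) for data in dataset]
--     return training_data, masked_count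
-- ===== Notes on version B (the rewrite author's own statement) =====
-- stated objective: simpler
-- what changed: Replaces the incremental count/pending-run bookkeeping with a per-word masking comprehension plus a separate two-pointer run-length scan over the boolean mask, removing the leftover-run closing logic after the loop.
import Mathlib
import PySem

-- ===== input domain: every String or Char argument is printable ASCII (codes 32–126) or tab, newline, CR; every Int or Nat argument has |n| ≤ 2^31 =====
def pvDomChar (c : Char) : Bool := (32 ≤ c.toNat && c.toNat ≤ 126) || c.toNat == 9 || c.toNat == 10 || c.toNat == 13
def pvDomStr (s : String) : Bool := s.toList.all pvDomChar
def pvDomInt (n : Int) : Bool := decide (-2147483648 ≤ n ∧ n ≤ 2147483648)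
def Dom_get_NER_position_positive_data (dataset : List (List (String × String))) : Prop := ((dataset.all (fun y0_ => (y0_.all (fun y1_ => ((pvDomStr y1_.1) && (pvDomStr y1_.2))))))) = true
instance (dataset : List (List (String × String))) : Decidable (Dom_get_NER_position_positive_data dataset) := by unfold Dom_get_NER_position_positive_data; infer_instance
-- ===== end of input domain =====

-- B replaces A's incremental pending-run bookkeeping with a masking map plus a separate two-pointer run scan (objective: simpler).


-- ===== PORT A =====
-- inner loop of A: state (complete_sentences, count, count_frq), ind the current index
def pvALoop : List (String × String) → Nat → Int → List String → List (List Int) →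
    List String × Int × List (List Int)
  | [], _, count, cs, frq => (cs, count, frq)
  | word :: rest, ind, count, cs, frq =>
    if word.2 ≠ "O" then
      pvALoop rest (ind + 1) (count + 1) (cs ++ ["<MASK>"]) frq
    else
      pvALoop rest (ind + 1) 0 (cs ++ [word.1])
        (if count ≠ 0 then frq ++ [[count, (ind : Int) - count]] else frq)

def get_NER_position_positive_data (dataset : List (List (String × String))) :
    List (List String) × List (List (List Int)) :=
  dataset.foldl (fun acc data =>
    let st := pvALoop data 0 0 [] []
    -- trailing run: Python's `ind` here is the last index, data.length - 1
    let cf := if st.2.1 ≠ 0 then st.2.2 ++ [[st.2.1, ((data.length : Int) - 1) - st.2.1 + 1]] else st.2.2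
    (acc.1 ++ [st.1], acc.2 ++ [cf])) ([], [])

-- ===== PORT B =====
-- two-pointer run scan over the boolean mask (B's _runs)
def pvRuns : List Bool → Nat → List (List Int)
  | [], _ => []
  | false :: rest, i => pvRuns rest (i + 1)
  | true :: rest, i =>
    let k := (rest.takeWhile (· = true)).length + 1
    [(k : Int), (i : Int)] :: pvRuns (rest.drop (k - 1)) (i + k)
termination_by t _ => t.length
decreasing_by
all_goals simp only [List.length_cons, List.length_drop]
all_goals omega

def get_NER_position_positive_data_alt (dataset : List (List (String × String))) :
    List (List String) × List (List (List Int)) :=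
  (dataset.map (fun data => data.map (fun w => if w.2 ≠ "O" then "<MASK>" else w.1)),
   dataset.map (fun data => pvRuns (data.map (fun w => decide (w.2 ≠ "O"))) 0))

-- ===== PRECONDITION & SPEC =====
def Spec_get_NER_position_positive_data (dataset : List (List (String × String))) (out : List (List String) × List (List (List Int))) : Prop := out = get_NER_position_positive_data_alt dataset
instance (dataset : List (List (String × String))) (out : List (List String) × List (List (List Int))) : Decidable (Spec_get_NER_position_positive_data dataset out) := by unfold Spec_get_NER_position_positive_data; infer_instance

-- ===== CLAIM (what is proved, stated in full; the proofs are below) =====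
def Claim_equal_get_NER_position_positive_data : Prop := ∀ (dataset : List (List (String × String))), Dom_get_NER_position_positive_data dataset → Spec_get_NER_position_positive_data dataset (get_NER_position_positive_data dataset)

-- ===== LEMMAS AND PROOFS =====

-- helpers for the invariant
def pvTags (l : List (String × String)) : List Bool := l.map (fun w => decide (w.2 ≠ "O"))
def pvMask (l : List (String × String)) : List String := l.map (fun w => if w.2 ≠ "O" then "<MASK>" else w.1)
def pvLead (t : List Bool) : Nat := (t.takeWhile (· = true)).length
def pvClose (st : List String × Int × List (List Int)) (n : Int) : List String × List (List Int) :=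
  (st.1, if st.2.1 ≠ 0 then st.2.2 ++ [[st.2.1, n - st.2.1]] else st.2.2)
-- the runs B still produces after A's currently-pending run is closed
def pvPosRest (t : List Bool) (i : Nat) : List (List Int) :=
  if pvLead t = t.length then [] else pvRuns (t.drop (pvLead t + 1)) (i + pvLead t + 1)

theorem pvLead_cons_true (t : List Bool) : pvLead (true :: t) = pvLead t + 1 := by
  simp [pvLead, List.takeWhile]

theorem pvLead_cons_false (t : List Bool) : pvLead (false :: t) = 0 := by
  simp [pvLead, List.takeWhile]

theorem pvRuns_drop_lead (t : List Bool) (j : Nat) :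
    pvRuns (t.drop (pvLead t)) j
      = if pvLead t = t.length then [] else pvRuns (t.drop (pvLead t + 1)) (j + 1) := by
  induction t generalizing j with
  | nil => simp [pvLead, pvRuns]
  | cons b t ih =>
    cases b with
    | false => simp [pvLead_cons_false, pvRuns]
    | true =>
      rw [pvLead_cons_true]
      simp only [List.drop_succ_cons, List.length_cons]
      rw [ih j]
      by_cases h : pvLead t = t.length
      · rw [if_pos h, if_pos (by omega)]
      · rw [if_neg h, if_neg (by omega)]

theorem pvPosRest_cons_true (t : List Bool) (i : Nat) :
    pvPosRest (true :: t) i = pvPosRest t (i + 1) := by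
  simp only [pvPosRest, pvLead_cons_true, List.length_cons, List.drop_succ_cons,
    Nat.add_right_cancel_iff]
  by_cases h : pvLead t = t.length
  · rw [if_pos h, if_pos h]
  · rw [if_neg h, if_neg h]
    have : i + (pvLead t + 1) + 1 = i + 1 + pvLead t + 1 := by omega
    rw [this]

theorem pvMain (l : List (String × String)) :
    (∀ (i : Nat) (cs : List String) (frq : List (List Int)) (n : Int),
      n = (i : Int) + l.length →
      pvClose (pvALoop l i 0 cs frq) n = (cs ++ pvMask l, frq ++ pvRuns (pvTags l) i)) ∧
    (∀ (i : Nat) (c s : Int) (cs : List String) (frq : List (List Int)) (n : Int),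
      0 < c → s = (i : Int) - c → n = (i : Int) + l.length →
      pvClose (pvALoop l i c cs frq) n
        = (cs ++ pvMask l, frq ++ ([c + (pvLead (pvTags l) : Int), s] :: pvPosRest (pvTags l) i))) := by
  induction l with
  | nil =>
    refine ⟨?_, ?_⟩
    · intro i cs frq n hn
      simp [pvALoop, pvClose, pvTags, pvMask, pvRuns]
    · intro i c s cs frq n hc hs hn
      subst hs hn
      simp only [pvALoop, pvClose, pvTags, pvMask, pvPosRest, pvLead, List.map_nil,
        List.takeWhile_nil, List.length_nil, List.append_nil]
      rw [if_pos (by omega : ¬ c = 0)]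
      norm_num
  | cons w rest ih =>
    obtain ⟨ih0, ihp⟩ := ih
    have htagT : ∀ (hw : w.2 ≠ "O"), pvTags (w :: rest) = true :: pvTags rest := by
      intro hw; simp [pvTags, hw]
    have htagF : ∀ (hw : ¬ w.2 ≠ "O"), pvTags (w :: rest) = false :: pvTags rest := by
      intro hw
      have hw' : w.2 = "O" := not_not.mp hw
      simp [pvTags, hw']
    refine ⟨?_, ?_⟩
    · intro i cs frq n hn
      by_cases hw : w.2 ≠ "O"
      · have h := ihp (i + 1) 1 (i : Int) (cs ++ ["<MASK>"]) frq n (by norm_num)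
          (by push_cast; ring) (by subst hn; simp only [List.length_cons]; push_cast; ring)
        simp only [pvALoop, if_pos hw, zero_add] at *
        rw [h, htagT hw]
        refine Prod.ext ?_ ?_
        · simp [pvMask, hw]
        · show _ = frq ++ pvRuns (true :: pvTags rest) i
          rw [pvRuns]
          simp only [Nat.add_sub_cancel]
          have hdrop := pvRuns_drop_lead (pvTags rest)
            (i + ((List.takeWhile (· = true) (pvTags rest)).length + 1))
          rw [show (List.takeWhile (· = true) (pvTags rest)).length = pvLead (pvTags rest) from rfl] at *
          rw [hdrop]
          simp only [pvPosRest]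
          by_cases hL : pvLead (pvTags rest) = (pvTags rest).length
          · rw [if_pos hL, if_pos hL]
            push_cast
            ring_nf
          · rw [if_neg hL, if_neg hL]
            have : i + (pvLead (pvTags rest) + 1) + 1 = i + 1 + pvLead (pvTags rest) + 1 := by omega
            rw [this]
            push_cast
            ring_nf
      · have h := ih0 (i + 1) (cs ++ [w.1]) frq n (by subst hn; simp only [List.length_cons]; push_cast; ring)
        simp only [pvALoop, if_neg hw] at *
        rw [if_neg (by simp), h, htagF hw]
        refine Prod.ext ?_ ?_
        · simp [pvMask, hw]
        · show _ = frq ++ pvRuns (false :: pvTags rest) i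
          rw [pvRuns]
    · intro i c s cs frq n hc hs hn
      by_cases hw : w.2 ≠ "O"
      · have h := ihp (i + 1) (c + 1) s (cs ++ ["<MASK>"]) frq n (by omega)
          (by subst hs; push_cast; ring) (by subst hn; simp only [List.length_cons]; push_cast; ring)
        simp only [pvALoop, if_pos hw] at *
        rw [h, htagT hw, pvLead_cons_true, pvPosRest_cons_true]
        refine Prod.ext ?_ ?_
        · simp [pvMask, hw]
        · push_cast
          ring_nf
      · have h := ih0 (i + 1) (cs ++ [w.1])
          (frq ++ [[c, (i : Int) - c]]) n (by subst hn; simp only [List.length_cons]; push_cast; ring)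
        simp only [pvALoop, if_neg hw] at *
        rw [if_pos (by omega : ¬ c = 0), h, htagF hw]
        refine Prod.ext ?_ ?_
        · simp [pvMask, hw]
        · show _ = frq ++ ([c + (pvLead (false :: pvTags rest) : Int), s] :: pvPosRest (false :: pvTags rest) i)
          rw [pvLead_cons_false, pvPosRest]
          rw [if_neg (by simp [pvLead_cons_false])]
          simp only [pvLead_cons_false, List.drop_succ_cons, List.drop_zero, Nat.add_zero]
          subst hs
          simp [List.append_assoc]
  
theorem pvSentence (data : List (String × String)) :
    (let st := pvALoop data 0 0 [] []
     let cf := if st.2.1 ≠ 0 then st.2.2 ++ [[st.2.1, ((data.length : Int) - 1) - st.2.1 + 1]] else st.2.2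
     ((st.1 : List String), cf))
    = (data.map (fun w => if w.2 ≠ "O" then "<MASK>" else w.1),
       pvRuns (data.map (fun w => decide (w.2 ≠ "O"))) 0) := by
  have h := (pvMain data).1 0 [] [] ((0 : Int) + data.length) rfl
  simp only [pvClose, List.nil_append] at h
  refine Prod.ext ?_ ?_
  · simpa [pvMask] using congrArg Prod.fst h
  · have h2 := congrArg Prod.snd h
    simp only at h2
    show (if (pvALoop data 0 0 [] []).2.1 ≠ 0
        then (pvALoop data 0 0 [] []).2.2 ++ [[(pvALoop data 0 0 [] []).2.1, ((data.length : Int) - 1) - (pvALoop data 0 0 [] []).2.1 + 1]]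
        else (pvALoop data 0 0 [] []).2.2)
      = pvRuns (data.map (fun w => decide (w.2 ≠ "O"))) 0
    rw [show ((data.length : Int) - 1) - (pvALoop data 0 0 [] []).2.1 + 1
        = (0 : Int) + data.length - (pvALoop data 0 0 [] []).2.1 by ring]
    simpa [pvTags] using h2

theorem pvFold (dataset : List (List (String × String))) (acc1 : List (List String)) (acc2 : List (List (List Int))) :
    dataset.foldl (fun acc data =>
      let st := pvALoop data 0 0 [] []
      let cf := if st.2.1 ≠ 0 then st.2.2 ++ [[st.2.1, ((data.length : Int) - 1) - st.2.1 + 1]] else st.2.2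
      (acc.1 ++ [st.1], acc.2 ++ [cf])) (acc1, acc2)
    = (acc1 ++ dataset.map (fun data => data.map (fun w => if w.2 ≠ "O" then "<MASK>" else w.1)),
       acc2 ++ dataset.map (fun data => pvRuns (data.map (fun w => decide (w.2 ≠ "O"))) 0)) := by
  induction dataset generalizing acc1 acc2 with
  | nil => simp
  | cons data rest ih =>
    simp only [List.foldl_cons, List.map_cons]
    rw [ih]
    have h := pvSentence data
    simp only at h
    rw [Prod.mk.injEq] at h
    rw [h.1, h.2]
    simp

-- ===== VERDICT (by name: the statement is the Claim_ definition above) =====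
theorem get_NER_position_positive_data_spec : Claim_equal_get_NER_position_positive_data := by
  intro dataset _
  unfold Spec_get_NER_position_positive_data get_NER_position_positive_data get_NER_position_positive_data_alt
  rw [pvFold]
  simp
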